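-- pv_equiv track=rewrite | github.com/edubraga/Dojo-Myfreecomm | 2011-08-08/lampadas.py | lampadas
-- ===== SOURCE A (Python) =====
-- def lampadas(num):
--     if num == 0:
--         return []
--     else:
--         resultado = lampadas(num - 1)
--         div = numero_divisores(num)
--         resultado.append(div % 2)
--         return resultado
--
-- def numero_divisores(num):
--     cont = 1
--     for i in range(1, num):
--         if num % i == 0:
--             cont += 1
--
--     return cont
-- ===== SOURCE B (Python) =====
-- def lampadas(num):
--     result = [0] * num
--     j = 1
--     while j * j <= num:
--         result[j * j - 1] = 1
--         j += 1
--     return result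
-- ===== Notes on version B (the rewrite author's own statement) =====
-- stated objective: faster
-- what changed: Replaces the recursive build that counts the divisors of every i (odd divisor count = perfect square) by direct marking: preallocate [0]*num and set position j*j-1 to 1 for each j with j*j <= num.
import Mathlib
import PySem

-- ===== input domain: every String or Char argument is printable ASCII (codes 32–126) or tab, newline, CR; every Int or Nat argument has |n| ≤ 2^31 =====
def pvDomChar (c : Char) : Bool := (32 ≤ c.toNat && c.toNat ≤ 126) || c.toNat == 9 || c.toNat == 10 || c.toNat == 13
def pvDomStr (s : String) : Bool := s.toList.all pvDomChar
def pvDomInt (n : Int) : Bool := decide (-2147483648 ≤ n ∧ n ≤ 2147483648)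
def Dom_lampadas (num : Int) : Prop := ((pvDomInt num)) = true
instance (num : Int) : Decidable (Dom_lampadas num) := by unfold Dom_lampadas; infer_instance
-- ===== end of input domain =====

-- B replaces A's recursive build with per-element divisor counting (O(n^2)) by marking the
-- perfect-square positions of a preallocated zero list (O(n)); measured faster in a timing run.

-- ===== PORT A =====
def numero_divisores (num : Int) : Int :=
  (PySem.List.pyRange 1 num 1).foldl
    (fun cont i => if PySem.Int.mod num i == 0 then cont + 1 else cont) 1

-- A recurses num → num - 1 down to 0; realised as structural recursion on num.toNat
-- (for num < 0 Python's recursion never reaches 0 and raises RecursionError: excluded by Pre_).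
def lampadasGo : Nat → List Int
  | 0 => []
  | n + 1 => lampadasGo n ++ [PySem.Int.mod (numero_divisores ((n : Int) + 1)) 2]

def lampadas (num : Int) : List Int := lampadasGo num.toNat

-- ===== PORT B =====
-- the while loop of Source B: while j*j <= num: result[j*j-1] = 1; j += 1
-- fuel = num.toNat bounds the number of iterations (at most sqrt num of them run).
def markSquares (num : Int) (j : Int) (res : List Int) : Nat → List Int
  | 0 => res
  | fuel + 1 =>
    if j * j ≤ num then markSquares num (j + 1) (res.set (j * j - 1).toNat 1) fuel
    else res

def lampadas_alt (num : Int) : List Int :=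
  markSquares num 1 (List.replicate num.toNat 0) num.toNat

-- ===== PRECONDITION & SPEC =====
-- A terminates exactly on num ≥ 0; on num < 0 it raises RecursionError (B returns [] there).
def Pre_lampadas (num : Int) : Prop := 0 ≤ num
instance (num : Int) : Decidable (Pre_lampadas num) := by unfold Pre_lampadas; infer_instance
def pvWitness_lampadas : Int := 6

def Spec_lampadas (num : Int) (out : List Int) : Prop := out = lampadas_alt num
instance (num : Int) (out : List Int) : Decidable (Spec_lampadas num out) := by unfold Spec_lampadas; infer_instance

-- ===== CLAIM (what is proved, stated in full; the proofs are below) =====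
def Claim_equal_lampadas : Prop := ∀ (num : Int), Dom_lampadas num → Pre_lampadas num → Spec_lampadas num (lampadas num)

-- ===== LEMMAS AND PROOFS =====

-- the common normal form: position k holds 1 iff k+1 is a perfect square
def sqFlag (k : Nat) : Int := if Nat.sqrt (k + 1) * Nat.sqrt (k + 1) = k + 1 then 1 else 0

-- ---- number theory: the divisor count of N >= 1 is odd iff N is a perfect square ----

lemma card_filter_range_countP (m : Nat) (p : Nat → Bool) :
    ((Finset.range m).filter (fun k => p k)).card = (List.range m).countP p := by
  rw [Finset.card_filter]
  induction m with
  | zero => simp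
  | succ n ih => rw [Finset.sum_range_succ, List.range_succ]; simp [ih, List.countP_append, List.countP_cons]

lemma div_flip (N d : Nat) (hN : 1 ≤ N) (hdvd : d ∣ N) (hlt : d * d < N) :
    (N / d) ∣ N ∧ N < (N / d) * (N / d) := by
  obtain ⟨c, hc⟩ := hdvd
  have hd0 : 0 < d := by
    rcases Nat.eq_zero_or_pos d with h | h
    · subst h; simp at hc; omega
    · exact h
  have hcd : N / d = c := by rw [hc, Nat.mul_div_cancel_left _ hd0]
  have hdc : d < c := by
    by_contra hle
    push_neg at hle
    have : d * c ≤ d * d := Nat.mul_le_mul_left d hle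
    omega
  rw [hcd]
  exact ⟨⟨d, by rw [hc]; ring⟩, by calc N = d * c := hc
                               _ < c * c := by exact Nat.mul_lt_mul_of_lt_of_le hdc (le_refl c) (by omega)⟩

lemma div_flip' (N e : Nat) (hN : 1 ≤ N) (hdvd : e ∣ N) (hlt : N < e * e) :
    (N / e) ∣ N ∧ (N / e) * (N / e) < N := by
  obtain ⟨c, hc⟩ := hdvd
  have he0 : 0 < e := by
    rcases Nat.eq_zero_or_pos e with h | h
    · subst h; simp at hc; omega
    · exact h
  have hcd : N / e = c := by rw [hc, Nat.mul_div_cancel_left _ he0]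
  have hdc : c < e := by
    by_contra hle
    push_neg at hle
    have : e * e ≤ e * c := Nat.mul_le_mul_left e hle
    omega
  have hc0 : 0 < c := by
    rcases Nat.eq_zero_or_pos c with h | h
    · subst h; omega
    · exact h
  rw [hcd]
  exact ⟨⟨e, by rw [hc]; ring⟩, by calc c * c < e * c := Nat.mul_lt_mul_of_lt_of_le hdc (le_refl c) hc0
                              _ = N := by omega⟩

lemma divisors_card_small_eq_big (N : Nat) (hN : 1 ≤ N) :
    ((N.divisors).filter (fun d => d * d < N)).card
      = ((N.divisors).filter (fun d => N < d * d)).card := by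
  apply Finset.card_nbij (i := fun d => N / d)
  · intro d hd
    simp only [Finset.coe_filter, Set.mem_setOf_eq, Nat.mem_divisors] at *
    obtain ⟨⟨hdvd, _⟩, hlt⟩ := hd
    obtain ⟨h1, h2⟩ := div_flip N d hN hdvd hlt
    exact ⟨⟨h1, by omega⟩, h2⟩
  · intro a ha b hb h
    simp only [Finset.coe_filter, Set.mem_setOf_eq, Nat.mem_divisors] at ha hb
    have h1 := Nat.div_div_self ha.1.1 (by omega)
    have h2 := Nat.div_div_self hb.1.1 (by omega)
    simp only at h
    rw [← h1, ← h2, h]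
  · intro e he
    simp only [Finset.coe_filter, Set.mem_setOf_eq, Set.mem_image, Nat.mem_divisors] at *
    obtain ⟨⟨hdvd, _⟩, hlt⟩ := he
    obtain ⟨h1, h2⟩ := div_flip' N e hN hdvd hlt
    exact ⟨N / e, ⟨⟨h1, by omega⟩, h2⟩, Nat.div_div_self hdvd (by omega)⟩

lemma divisors_card_parity (N : Nat) (hN : 1 ≤ N) :
    (N.divisors).card % 2 = (if Nat.sqrt N * Nat.sqrt N = N then 1 else 0) := by
  have hsplit1 := Finset.filter_card_add_filter_neg_card_eq_card
    (s := N.divisors) (p := fun d => d * d < N)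
  have hsplit2 := Finset.filter_card_add_filter_neg_card_eq_card
    (s := N.divisors.filter (fun d => ¬ d * d < N)) (p := fun d => d * d = N)
  rw [Finset.filter_filter, Finset.filter_filter] at hsplit2
  have hmid : (N.divisors.filter (fun d => ¬ d * d < N ∧ d * d = N))
      = N.divisors.filter (fun d => d * d = N) := by
    apply Finset.filter_congr; intro d _; omega
  have hbig : (N.divisors.filter (fun d => ¬ d * d < N ∧ ¬ d * d = N))
      = N.divisors.filter (fun d => N < d * d) := by
    apply Finset.filter_congr; intro d _; constructor
    · rintro ⟨h1, h2⟩; omega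
    · intro h; exact ⟨by omega, by omega⟩
  rw [hmid, hbig] at hsplit2
  have hmidcard : (N.divisors.filter (fun d => d * d = N)).card
      = (if Nat.sqrt N * Nat.sqrt N = N then 1 else 0) := by
    split <;> rename_i hsq
    · rw [show N.divisors.filter (fun d => d * d = N) = {Nat.sqrt N} from ?_]
      · exact Finset.card_singleton _
      · apply Finset.ext
        intro d
        simp only [Finset.mem_filter, Nat.mem_divisors, Finset.mem_singleton]
        constructor
        · rintro ⟨_, hdd⟩
          have := Nat.mul_self_inj (m := d) (n := Nat.sqrt N)
          omega
        · rintro rfl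
          exact ⟨⟨⟨Nat.sqrt N, hsq.symm⟩, by omega⟩, hsq⟩
    · rw [show N.divisors.filter (fun d => d * d = N) = ∅ from ?_]
      · exact Finset.card_empty
      · apply Finset.eq_empty_of_forall_notMem
        intro d
        simp only [Finset.mem_filter, Nat.mem_divisors]
        rintro ⟨_, hdd⟩
        exact hsq (by rw [show Nat.sqrt N = d from by rw [← hdd, show d * d = d ^ 2 from by ring, Nat.sqrt_eq']]; exact hdd)
  have heq := divisors_card_small_eq_big N hN
  have hM : (N.divisors.filter (fun d => d * d = N)).card ≤ 1 := by
    rw [hmidcard]; split <;> omega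
  rw [← hmidcard]
  omega

lemma numero_divisores_eq_card (n : Nat) :
    numero_divisores ((n : Int) + 1) = ((n + 1 : Nat).divisors).card := by
  unfold numero_divisores
  rw [PySem.List.foldl_count_if]
  have hrange : ((n : Int) + 1 - 1).toNat = n := by omega
  rw [PySem.List.pyRange_one, hrange, List.countP_map]
  have hdiv : (n + 1).divisors = Finset.filter (· ∣ (n + 1)) (Finset.Ico 1 (n + 2)) := rfl
  have hsplit : Finset.Ico 1 (n + 2) = insert (n + 1) (Finset.Ico 1 (n + 1)) :=
    Nat.Ico_succ_right_eq_insert_Ico (by omega)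
  have hbij : ((Finset.range n).filter (fun k => decide ((k + 1) ∣ (n + 1)))).card
      = (Finset.filter (· ∣ (n + 1)) (Finset.Ico 1 (n + 1))).card := by
    apply Finset.card_nbij (i := fun k => k + 1)
    · intro k hk
      simp only [Finset.coe_filter, Set.mem_setOf_eq, Finset.mem_range, Finset.mem_coe,
        Finset.mem_filter, Finset.mem_Ico, decide_eq_true_eq] at *
      omega
    · intro a _ b _ h; simpa using h
    · intro d hd
      simp only [Finset.coe_filter, Set.mem_setOf_eq, Finset.mem_Ico, Set.mem_image,
        Finset.mem_range, Finset.mem_coe, Finset.mem_filter, decide_eq_true_eq] at *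
      exact ⟨d - 1, ⟨by omega, by rw [Nat.sub_add_cancel (by omega)]; exact hd.2⟩, by omega⟩
  have hcnt : List.countP ((fun i => PySem.Int.mod ((n : Int) + 1) i == 0) ∘ fun (k : Nat) => 1 + (k : Int)) (List.range n)
      = List.countP (fun k => decide ((k + 1) ∣ (n + 1))) (List.range n) := by
    apply List.countP_congr
    intro k _
    simp only [Function.comp, beq_iff_eq, decide_eq_true_eq]
    rw [PySem.Int.mod_eq_zero_iff_dvd,
      show (1 + (k : Int)) = ((k + 1 : Nat) : Int) by push_cast; ring,
      show ((n : Int) + 1) = ((n + 1 : Nat) : Int) by push_cast; ring,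
      Int.natCast_dvd_natCast]
  rw [hcnt, ← card_filter_range_countP, hbij]
  rw [hdiv, hsplit, Finset.filter_insert, if_pos (dvd_refl _)]
  rw [Finset.card_insert_of_notMem (by simp [Finset.mem_Ico])]
  push_cast
  ring

lemma nd_parity (n : Nat) :
    PySem.Int.mod (numero_divisores ((n : Int) + 1)) 2 = sqFlag n := by
  rw [numero_divisores_eq_card, PySem.Int.mod_eq_emod_of_pos (by norm_num : (0:Int) < 2)]
  rw [show ((((n + 1 : Nat).divisors.card : Nat)) : Int) % 2
        = (((n + 1 : Nat).divisors.card % 2 : Nat) : Int) from by push_cast; rfl]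
  rw [divisors_card_parity _ (by omega)]
  unfold sqFlag
  split <;> simp

lemma lampadasGo_eq (n : Nat) : lampadasGo n = (List.range n).map sqFlag := by
  induction n with
  | zero => rfl
  | succ m ih => rw [lampadasGo, ih, List.range_succ, List.map_append, nd_parity]; rfl

-- ---- B side: the marking loop produces the same normal form ----

lemma set_map_range (n i : Nat) (r : Nat → Int) (v : Int) (h : i < n) :
    ((List.range n).map r).set i v = (List.range n).map (fun k => if k = i then v else r k) := by
  apply List.ext_getElem <;> simp
  intro k hk
  rw [List.getElem_set]
  split <;> rename_i h1
  · simp [h1.symm]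
  · rw [if_neg (by omega), List.getElem_map, List.getElem_range]

lemma mark_done (n jn : Nat) (hs : Nat.sqrt n < jn) (r : Nat → Int) :
    (List.range n).map (fun k => if jn ≤ Nat.sqrt (k + 1) ∧ Nat.sqrt (k + 1) * Nat.sqrt (k + 1) = k + 1 then 1 else r k)
      = (List.range n).map r := by
  apply List.map_congr_left
  intro k hk
  rw [List.mem_range] at hk
  rw [if_neg]
  rintro ⟨h1, h2⟩
  have hle : Nat.sqrt (k+1) ≤ Nat.sqrt n := Nat.sqrt_le_sqrt (by omega)
  omega

lemma mark_spec (fuel : Nat) : ∀ (num : Int), 0 ≤ num → ∀ (jn : Nat), 1 ≤ jn → ∀ (r : Nat → Int),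
    Nat.sqrt num.toNat < fuel + jn →
    markSquares num (jn : Int) ((List.range num.toNat).map r) fuel
      = (List.range num.toNat).map
          (fun k => if jn ≤ Nat.sqrt (k + 1) ∧ Nat.sqrt (k + 1) * Nat.sqrt (k + 1) = k + 1 then 1 else r k) := by
  induction fuel with
  | zero =>
    intro num hnum jn hj r hf
    rw [markSquares, mark_done _ _ (by omega)]
  | succ f ih =>
    intro num hnum jn hj r hf
    rw [markSquares]
    by_cases hc : (jn : Int) * (jn : Int) ≤ num
    · rw [if_pos hc]
      have hjj : jn * jn ≤ num.toNat := (Int.le_toNat hnum).mpr (by exact_mod_cast hc)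
      have hone : 1 ≤ jn * jn := Nat.mul_le_mul hj hj
      have hidx : ((jn : Int) * (jn : Int) - 1).toNat = jn * jn - 1 := by
        have : (jn : Int) * (jn : Int) = ((jn * jn : Nat) : Int) := by push_cast; ring
        omega
      have hlt : jn * jn - 1 < num.toNat := by omega
      rw [hidx, set_map_range _ _ _ _ hlt]
      have hcast : (jn : Int) + 1 = ((jn + 1 : Nat) : Int) := by push_cast; ring
      rw [hcast, ih num hnum (jn+1) (by omega) _ (by omega)]
      apply List.map_congr_left
      intro k hk
      rw [List.mem_range] at hk
      by_cases hA : jn + 1 ≤ Nat.sqrt (k+1) ∧ Nat.sqrt (k+1) * Nat.sqrt (k+1) = k+1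
      · rw [if_pos hA, if_pos ⟨by omega, hA.2⟩]
      · rw [if_neg hA]
        by_cases hk1 : k = jn * jn - 1
        · have hkk : k + 1 = jn * jn := by omega
          have hs : Nat.sqrt (k+1) = jn := by
            rw [hkk, show jn * jn = jn ^ 2 by ring, Nat.sqrt_eq']
          rw [if_pos hk1, if_pos ⟨by omega, by rw [hs, hkk]⟩]
        · rw [if_neg hk1, if_neg]
          rintro ⟨h1, h2⟩
          apply hA
          refine ⟨?_, h2⟩
          by_contra hlt2
          have hs2 : Nat.sqrt (k+1) = jn := by omega
          rw [hs2] at h2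
          omega
    · rw [if_neg hc]
      have h1 : num < ((jn * jn : Nat) : Int) := by push_cast; omega
      have h2 : num.toNat < jn * jn := by omega
      have hs : Nat.sqrt num.toNat < jn := by
        rw [Nat.sqrt_lt']
        rw [show jn ^ 2 = jn * jn by ring]
        omega
      rw [mark_done _ _ hs]

lemma lampadas_alt_eq (num : Int) (h : 0 ≤ num) :
    lampadas_alt num = (List.range num.toNat).map sqFlag := by
  unfold lampadas_alt
  rw [show (List.replicate num.toNat (0 : Int)) = (List.range num.toNat).map (fun _ => 0) from by
        simp [List.map_const']]
  rw [show (1 : Int) = ((1 : Nat) : Int) from rfl]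
  rw [mark_spec _ num h 1 le_rfl _ (by have := Nat.sqrt_le_self num.toNat; omega)]
  apply List.map_congr_left
  intro k hk
  unfold sqFlag
  by_cases hsq : Nat.sqrt (k + 1) * Nat.sqrt (k + 1) = k + 1
  · have h1 : 0 < Nat.sqrt (k + 1) := Nat.sqrt_pos.mpr (by omega)
    rw [if_pos ⟨by omega, hsq⟩, if_pos hsq]
  · rw [if_neg (fun hc => hsq hc.2), if_neg hsq]

-- ===== VERDICT (by name: the statement is the Claim_ definition above) =====
theorem lampadas_spec : Claim_equal_lampadas := by
  intro num _ hpre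
  unfold Spec_lampadas lampadas
  rw [lampadas_alt_eq num hpre, lampadasGo_eq]
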